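-- pv_equiv track=rewrite | github.com/Simon-Fuhaoyuan/pyrfuniverse | pyrfuniverse/attributes/controller_attr.py | _parse_raw_list_3
-- ===== SOURCE A (Python) =====
-- def _parse_raw_list_3(raw_list):
--     length = len(raw_list)
--     assert length % 3 == 0
--     number_of_parts = length // 3
--     norm_list = []
--     for j in range(number_of_parts):
--         transform = [raw_list[3 * j], raw_list[3 * j + 1], raw_list[3 * j + 2]]
--         norm_list.append(transform)
--
--     return norm_list
-- ===== SOURCE B (Python) =====
-- def _parse_raw_list_3(raw_list):
--     assert len(raw_list) % 3 == 0
--     it = iter(raw_list)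
--     return [list(t) for t in zip(it, it, it)]
-- ===== Notes on version B (the rewrite author's own statement) =====
-- stated objective: idiomatic
-- what changed: B replaces the index-arithmetic loop (raw_list[3*j], 3*j+1, 3*j+2) by the standard iterator-grouping idiom zip(it, it, it) over a single shared iterator, pulling three elements per step with no index computation.
import Mathlib
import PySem

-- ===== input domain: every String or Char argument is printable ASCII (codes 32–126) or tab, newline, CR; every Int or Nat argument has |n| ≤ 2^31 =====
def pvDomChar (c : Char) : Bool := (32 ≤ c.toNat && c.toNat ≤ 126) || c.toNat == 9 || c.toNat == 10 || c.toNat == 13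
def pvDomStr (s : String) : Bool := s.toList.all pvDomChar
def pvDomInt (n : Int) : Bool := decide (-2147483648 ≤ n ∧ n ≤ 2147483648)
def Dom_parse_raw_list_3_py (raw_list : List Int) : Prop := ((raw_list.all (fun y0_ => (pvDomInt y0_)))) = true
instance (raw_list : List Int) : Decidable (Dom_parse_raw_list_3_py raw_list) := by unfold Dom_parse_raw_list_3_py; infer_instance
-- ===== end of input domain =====

-- B groups the list with the iterator idiom zip(it, it, it) (three pulls per step, no index
-- arithmetic) instead of A's loop indexing raw_list[3*j], [3*j+1], [3*j+2].

-- ===== PORT A =====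
-- literal port of A: length, assert (→ Pre_), number_of_parts = length // 3, indexed loop
def parse_raw_list_3_py (raw_list : List Int) : List (List Int) :=
  let length : Int := raw_list.length
  let number_of_parts : Int := PySem.Int.floordiv length 3
  (PySem.List.pyRange 0 number_of_parts 1).foldl
    (fun norm_list j =>
      norm_list ++ [[PySem.List.pyGetD raw_list (3 * j) 0,
                     PySem.List.pyGetD raw_list (3 * j + 1) 0,
                     PySem.List.pyGetD raw_list (3 * j + 2) 0]]) []

-- ===== PORT B =====
-- port of B: the shared iterator yields three elements per zip step; leftovers are truncated
def parse_raw_list_3_py_alt : List Int → List (List Int)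
  | a :: b :: c :: rest => [a, b, c] :: parse_raw_list_3_py_alt rest
  | _ => []

-- ===== PRECONDITION & SPEC =====
-- Pre_: A's (and B's) assert — the length must be a multiple of 3, else AssertionError
def Pre_parse_raw_list_3_py (raw_list : List Int) : Prop := raw_list.length % 3 = 0
instance (raw_list : List Int) : Decidable (Pre_parse_raw_list_3_py raw_list) := by
  unfold Pre_parse_raw_list_3_py; infer_instance

def pvWitness_parse_raw_list_3_py : List Int := [1, 2, 3, 4, 5, 6]

def Spec_parse_raw_list_3_py (raw_list : List Int) (out : List (List Int)) : Prop :=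
  out = parse_raw_list_3_py_alt raw_list
instance (raw_list : List Int) (out : List (List Int)) : Decidable (Spec_parse_raw_list_3_py raw_list out) := by
  unfold Spec_parse_raw_list_3_py; infer_instance

-- ===== CLAIM (what is proved, stated in full; the proofs are below) =====
def Claim_equal_parse_raw_list_3_py : Prop :=
  ∀ (raw_list : List Int), Dom_parse_raw_list_3_py raw_list →
    Pre_parse_raw_list_3_py raw_list →
    Spec_parse_raw_list_3_py raw_list (parse_raw_list_3_py raw_list)

-- ===== LEMMAS AND PROOFS =====

-- A's loop in map-over-Nat-range form equals B's three-at-a-time recursion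
theorem range_map_eq_alt (xs : List Int) (h : xs.length % 3 = 0) :
    (List.range (xs.length / 3)).map
      (fun j => [xs.getD (3 * j) 0, xs.getD (3 * j + 1) 0, xs.getD (3 * j + 2) 0])
      = parse_raw_list_3_py_alt xs := by
  induction xs using parse_raw_list_3_py_alt.induct with
  | case1 a b c rest ih =>
      have hlen : (a :: b :: c :: rest).length / 3 = rest.length / 3 + 1 := by
        simp only [List.length_cons]; omega
      have hr : rest.length % 3 = 0 := by simp only [List.length_cons] at h; omega
      rw [hlen, List.range_succ_eq_map]
      simp only [List.map_cons, List.map_map]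
      rw [parse_raw_list_3_py_alt]
      congr 1
      rw [← ih hr]
      apply List.map_congr_left
      intro j _
      have e1 : 3 * (j + 1) = 3 * j + 1 + 1 + 1 := by omega
      simp [Function.comp, e1]
  | case2 x hne =>
      match x, hne with
      | [], _ => rfl
      | [a], hne => simp at h
      | [a, b], hne => simp at h
      | (a :: b :: c :: rest), hne => exact absurd rfl (hne a b c rest)

theorem parse_A_eq (xs : List Int) (h : xs.length % 3 = 0) :
    parse_raw_list_3_py xs = parse_raw_list_3_py_alt xs := by
  simp only [parse_raw_list_3_py]
  have hfd : PySem.Int.floordiv (xs.length : Int) 3 = ((xs.length / 3 : Nat) : Int) := by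
    exact_mod_cast PySem.Int.floordiv_natCast xs.length 3
  rw [hfd, PySem.List.foldl_append_singleton_eq_map, List.nil_append,
      PySem.List.pyRange_one]
  have ht : (((xs.length / 3 : Nat) : Int) - 0).toNat = xs.length / 3 := by omega
  rw [ht, List.map_map]
  rw [← range_map_eq_alt xs h]
  apply List.map_congr_left
  intro j _
  have c1 : (3 : Int) * (j : Int) = ((3 * j : Nat) : Int) := by push_cast; ring
  have c2 : ((3 * j : Nat) : Int) + 1 = ((3 * j + 1 : Nat) : Int) := by push_cast; ring
  have c3 : ((3 * j : Nat) : Int) + 2 = ((3 * j + 2 : Nat) : Int) := by push_cast; ring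
  simp only [Function.comp_apply, zero_add, c1, c2, c3, PySem.List.pyGetD_natCast]

-- ===== VERDICT (by name: the statement is the Claim_ definition above) =====
theorem parse_raw_list_3_py_spec : Claim_equal_parse_raw_list_3_py := by
  intro raw_list _ hpre
  exact parse_A_eq raw_list hpre
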